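-- pv_equiv track=rewrite | github.com/tsuru7/algorithm-study | AtCoder/ABC240/E.py | dfs
-- ===== SOURCE A (Python) =====
-- def dfs(u, graph, visited, segments, nseg):
--     leaf = True
--     left_most = nseg+1
--     right_most = 0
--     for v in graph[u]:
--         if visited[v]:
--             continue
--         visited[v] = True
--         leaf = False
--         seg_, nseg = dfs(v, graph, visited, segments, nseg)
--         left, right = seg_
--         left_most = min(left_most, left)
--         right_most = max(right_most, right)
--     if leaf:
--         nseg += 1
--         segments[u] = [nseg, nseg]
--     else:
--         segments[u] = [left_most, right_most]
--
--     return segments[u], nseg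
-- ===== SOURCE B (Python) =====
-- def dfs(u, graph, visited, segments, nseg):
--     # Iterative DFS with an explicit stack of frames instead of recursion.
--     # Mutates visited/segments in place exactly as the recursive version does.
--     # frame = (node, pending neighbors reversed (popped from the end),
--     #          running left_most, running right_most, leaf flag)
--     stack = [(u, list(reversed(graph[u])), nseg + 1, 0, True)]
--     result = None
--     while stack:
--         node, rest, lm, rm, leaf = stack.pop()
--         child = None
--         while rest:
--             v = rest.pop()
--             if not visited[v]:
--                 child = v
--                 break
--         if child is not None:
--             visited[child] = True
--             stack.append((node, rest, lm, rm, False))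
--             stack.append((child, list(reversed(graph[child])), nseg + 1, 0, True))
--             continue
--         # node finished
--         if leaf:
--             nseg += 1
--             l = r = nseg
--         else:
--             l, r = lm, rm
--         segments[node] = [l, r]
--         if stack:
--             pn, pr, plm, prm, pleaf = stack.pop()
--             stack.append((pn, pr, min(plm, l), max(prm, r), pleaf))
--         else:
--             result = [l, r]
--     return result, nseg
-- ===== Notes on version B (the rewrite author's own statement) =====
-- stated objective: alternative
-- what changed: A's recursion is replaced by an iterative DFS over an explicit stack of (node, pending-neighbours, left_most, right_most, leaf) frames that folds each finished interval into its parent frame; B performs the same index accesses in the same order, so it returns A's value on every input on which A returns and raises exactly where A raises.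
import Mathlib
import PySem

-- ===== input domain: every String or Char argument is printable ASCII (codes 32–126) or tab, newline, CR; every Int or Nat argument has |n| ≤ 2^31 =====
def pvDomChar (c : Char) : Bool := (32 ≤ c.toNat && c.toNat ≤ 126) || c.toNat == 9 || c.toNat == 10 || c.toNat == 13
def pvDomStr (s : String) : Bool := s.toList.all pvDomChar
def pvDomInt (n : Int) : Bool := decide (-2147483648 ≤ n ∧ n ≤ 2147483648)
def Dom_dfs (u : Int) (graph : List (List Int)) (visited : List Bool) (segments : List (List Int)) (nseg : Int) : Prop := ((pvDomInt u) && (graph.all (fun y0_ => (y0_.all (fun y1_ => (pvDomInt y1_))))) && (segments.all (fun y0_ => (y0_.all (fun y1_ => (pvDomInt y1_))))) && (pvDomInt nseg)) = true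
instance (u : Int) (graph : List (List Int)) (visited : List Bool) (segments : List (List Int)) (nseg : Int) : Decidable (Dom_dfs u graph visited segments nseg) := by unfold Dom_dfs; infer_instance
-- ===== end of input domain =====

-- B replaces A's recursion by an iterative DFS over an explicit stack of frames (same traversal,
-- same in-place mutation of visited/segments); the equivalence proved here is about the return value.

-- ===== PORT A =====
-- A is recursive; the port threads the mutated state (visited, segments, nseg) explicitly and
-- uses fuel (recursion depth is bounded by the number of unvisited nodes + 1, see the lemmas).
-- goA is the 'for v in graph[u]' loop of A with its accumulator (leaf, left_most, right_most).
mutual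
def goA (graph : List (List Int)) (fuel : Nat) (vs : List Int) (leaf : Bool) (lm rm : Int)
    (visited : List Bool) (segments : List (List Int)) (nseg : Int) :
    Option (Bool × Int × Int × List Bool × List (List Int) × Int) :=
  match vs with
  | [] => some (leaf, lm, rm, visited, segments, nseg)
  | v :: vs' =>
    match PySem.List.pyGet? visited v with          -- visited[v]
    | none => none
    | some true => goA graph fuel vs' leaf lm rm visited segments nseg
    | some false =>
      match PySem.List.pySet? visited v true with   -- visited[v] = True
      | none => none
      | some visited' =>
        match dfsA graph fuel v visited' segments nseg with
        | none => none
        | some (seg, v2, s2, n2) =>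
          match seg with                             -- left, right = seg_
          | [l, r] => goA graph fuel vs' false (min lm l) (max rm r) v2 s2 n2
          | _ => none
termination_by (fuel, vs.length + 1)

def dfsA (graph : List (List Int)) (fuel : Nat) (u : Int)
    (visited : List Bool) (segments : List (List Int)) (nseg : Int) :
    Option (List Int × List Bool × List (List Int) × Int) :=
  match fuel with
  | 0 => none
  | fuel' + 1 =>
    match PySem.List.pyGet? graph u with            -- graph[u]
    | none => none
    | some row =>
      match goA graph fuel' row true (nseg + 1) 0 visited segments nseg with
      | none => none
      | some (leaf, lm, rm, v1, s1, n1) =>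
        if leaf then
          match PySem.List.pySet? s1 u [n1 + 1, n1 + 1] with   -- segments[u] = [nseg, nseg]
          | none => none
          | some s2 => some ([n1 + 1, n1 + 1], v1, s2, n1 + 1) -- return segments[u], nseg
        else
          match PySem.List.pySet? s1 u [lm, rm] with
          | none => none
          | some s2 => some ([lm, rm], v1, s2, n1)
termination_by (fuel, 0)
end

def dfs (u : Int) (graph : List (List Int)) (visited : List Bool) (segments : List (List Int)) (nseg : Int) : List Int × Int :=
  match dfsA graph (visited.length + 1) u visited segments nseg with
  | none => ([], 0)
  | some (seg, _, _, n1) => (seg, n1)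

-- ===== PORT B =====
-- the inner 'while rest: v = rest.pop()' loop of Source B; Python keeps the pending neighbours
-- reversed and pops from the end, the port keeps them in order and pops from the front —
-- the same sequence of neighbours in the same order.
def findChildB (rest : List Int) (visited : List Bool) : Option (Option Int × List Int) :=
  match rest with
  | [] => some (none, [])
  | v :: vs =>
    match PySem.List.pyGet? visited v with          -- visited[v]
    | none => none
    | some true => findChildB vs visited
    | some false => some (some v, vs)

-- the 'while stack' loop of Source B; a frame is (node, pending neighbours, lm, rm, leaf)
def runB (graph : List (List Int)) (fuel : Nat) (stack : List (Int × List Int × Int × Int × Bool))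
    (visited : List Bool) (segments : List (List Int)) (nseg : Int) : Option (List Int × Int) :=
  match fuel with
  | 0 => none
  | fuel' + 1 =>
    match stack with
    | [] => none
    | (node, rest, lm, rm, leaf) :: S =>
      match findChildB rest visited with
      | none => none
      | some (some v, rest') =>                      -- child found: push parent back, push child
        match PySem.List.pySet? visited v true with  -- visited[child] = True
        | none => none
        | some visited' =>
          match PySem.List.pyGet? graph v with       -- graph[child]
          | none => none
          | some row =>
            runB graph fuel' ((v, row, nseg + 1, 0, true) :: (node, rest', lm, rm, false) :: S)
              visited' segments nseg
      | some (none, _) =>                            -- node finished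
        let l := if leaf then nseg + 1 else lm
        let r := if leaf then nseg + 1 else rm
        let nseg' := if leaf then nseg + 1 else nseg
        match PySem.List.pySet? segments node [l, r] with   -- segments[node] = [l, r]
        | none => none
        | some segments' =>
          match S with
          | [] => some ([l, r], nseg')               -- stack empty: result
          | (pn, pr, plm, prm, pl) :: S' =>          -- fold into parent frame
            runB graph fuel' ((pn, pr, min plm l, max prm r, pl) :: S') visited segments' nseg'

def dfs_alt (u : Int) (graph : List (List Int)) (visited : List Bool) (segments : List (List Int)) (nseg : Int) : List Int × Int :=
  match PySem.List.pyGet? graph u with               -- list(reversed(graph[u])) for the root frame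
  | none => ([], 0)
  | some row =>
    match runB graph (2 * visited.length + 2) [(u, row, nseg + 1, 0, true)] visited segments nseg with
    | none => ([], 0)
    | some res => res

-- ===== PRECONDITION & SPEC =====
-- Pre_dfs excludes exactly the inputs on which A raises (an IndexError on graph[u]/visited[v]/
-- segments[u]); on every input Pre_dfs admits, A returns normally.  It excludes no input on which
-- A returns: which indices A dereferences is determined by the traversal itself (a bad index in a
-- row the walk never reaches does not raise), so no quantifier over the input lists states this
-- set, and Pre_dfs is the dereference-safety of the walk: chkG/chkD follow the same neighbour
-- order tracking only the visited marks — no intervals, no leaf flag, no counter, not a port.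
-- chkG is one neighbour row: skip a visited entry, mark and descend (via chk) on an unvisited one.
def chkG (chk : Int -> List Bool -> Option (List Bool)) : List Int -> List Bool -> Option (List Bool)
  | [], vis => some vis
  | v :: vs', vis =>
    match PySem.List.pyGet? vis v with              -- visited[v] must exist
    | none => none
    | some true => chkG chk vs' vis
    | some false =>
      match PySem.List.pySet? vis v true with
      | none => none
      | some vis' =>
        match chk v vis' with
        | none => none
        | some v2 => chkG chk vs' v2

-- chkD is one node: graph[u] must exist, its row must be safe, segments[u] must be in range.
def chkD (graph : List (List Int)) (ns : Nat) : Nat -> Int -> List Bool -> Option (List Bool)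
  | 0, _, _ => none
  | fuel + 1, u, vis =>
    match PySem.List.pyGet? graph u with            -- graph[u] must exist
    | none => none
    | some row =>
      match chkG (chkD graph ns fuel) row vis with
      | none => none
      | some w =>
        match PySem.List.pyIdx? ns u with           -- segments[u] = ... must be in range
        | none => none
        | some _ => some w

def Pre_dfs (u : Int) (graph : List (List Int)) (visited : List Bool) (segments : List (List Int)) (nseg : Int) : Prop :=
  (chkD graph segments.length (visited.length + 1) u visited).isSome = true

instance (u : Int) (graph : List (List Int)) (visited : List Bool) (segments : List (List Int)) (nseg : Int) : Decidable (Pre_dfs u graph visited segments nseg) := by unfold Pre_dfs; infer_instance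

def pvWitness_dfs : Int × List (List Int) × List Bool × List (List Int) × Int :=
  (0, [[1], []], [false, false], [[], []], 0)

def Spec_dfs (u : Int) (graph : List (List Int)) (visited : List Bool) (segments : List (List Int)) (nseg : Int) (out : List Int × Int) : Prop := out = dfs_alt u graph visited segments nseg
instance (u : Int) (graph : List (List Int)) (visited : List Bool) (segments : List (List Int)) (nseg : Int) (out : List Int × Int) : Decidable (Spec_dfs u graph visited segments nseg out) := by unfold Spec_dfs; infer_instance

-- ===== CLAIM (what is proved, stated in full; the proofs are below) =====
def Claim_equal_dfs : Prop := ∀ (u : Int) (graph : List (List Int)) (visited : List Bool) (segments : List (List Int)) (nseg : Int), Dom_dfs u graph visited segments nseg → Pre_dfs u graph visited segments nseg → Spec_dfs u graph visited segments nseg (dfs u graph visited segments nseg)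

-- ===== LEMMAS AND PROOFS =====

lemma pySet?_length {α : Type} (xs : List α) (i : Int) (w : α) (ys : List α)
    (h : PySem.List.pySet? xs i w = some ys) : ys.length = xs.length := by
  unfold PySem.List.pySet? at h
  cases hk : PySem.List.pyIdx? xs.length i <;> rw [hk] at h
  · simp at h
  · simp only [Option.map_some, Option.some.injEq] at h
    subst h; simp

lemma pyGetSet_invert {α : Type} (xs : List α) (i : Int) (b : α) (w : α)
    (h : PySem.List.pyGet? xs i = some b) :
    ∃ k, xs[k]? = some b ∧ PySem.List.pySet? xs i w = some (xs.set k w) := by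
  unfold PySem.List.pyGet? at h
  cases hk : PySem.List.pyIdx? xs.length i <;> rw [hk] at h
  · simp at h
  · exact ⟨_, by simpa using h, by simp [PySem.List.pySet?, hk]⟩

lemma count_false_set (l : List Bool) (k : Nat) (h : l[k]? = some false) :
    (l.set k true).count false + 1 = l.count false := by
  induction l generalizing k with
  | nil => simp at h
  | cons a t ih =>
    cases k with
    | zero => simp_all
    | succ k =>
      have := ih k (by simpa using h)
      simp [List.count_cons]
      omega

lemma cf_set_false (visited : List Bool) (v : Int) (v' : List Bool)
    (hg : PySem.List.pyGet? visited v = some false)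
    (hs : PySem.List.pySet? visited v true = some v') :
    v'.length = visited.length ∧ v'.count false + 1 = visited.count false := by
  obtain ⟨k, hget, hset⟩ := pyGetSet_invert visited v false true hg
  rw [hs] at hset
  obtain rfl : v' = visited.set k true := Option.some_inj.mp hset
  exact ⟨by simp, count_false_set visited k hget⟩

lemma pySet?_eq_set {α : Type} (xs : List α) (i : Int) (w : α) (ys : List α)
    (h : PySem.List.pySet? xs i w = some ys) : ∃ k, ys = xs.set k w := by
  unfold PySem.List.pySet? at h
  cases hk : PySem.List.pyIdx? xs.length i <;> rw [hk] at h
  · simp at h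
  · exact ⟨_, (Option.some_inj.mp h).symm⟩

lemma set_true_mono (visited : List Bool) (v : Int) (visited' : List Bool)
    (hs : PySem.List.pySet? visited v true = some visited') :
    ∀ k : Nat, visited[k]? = some true → visited'[k]? = some true := by
  obtain ⟨k0, rfl⟩ := pySet?_eq_set visited v true visited' hs
  intro k hk
  by_cases hkk : k0 = k
  · subst hkk
    have : k0 < visited.length := (List.getElem?_eq_some_iff.mp hk).1
    simp [this]
  · simpa [List.getElem?_set, hkk] using hk

lemma pySet?_some_of_pyIdx? {α : Type} (xs : List α) (i : Int) (w : α) (k : Nat)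
    (h : PySem.List.pyIdx? xs.length i = some k) :
    PySem.List.pySet? xs i w = some (xs.set k w) := by
  simp [PySem.List.pySet?, h]

-- monotonicity/preservation: A's recursion never unsets visited and preserves lengths
def PresD (graph : List (List Int)) (f : Nat) : Prop :=
  ∀ u visited segments nseg seg v1 s1 n1,
    dfsA graph f u visited segments nseg = some (seg, v1, s1, n1) →
    v1.length = visited.length ∧ s1.length = segments.length ∧
    v1.count false ≤ visited.count false ∧
    ∀ k : Nat, visited[k]? = some true → v1[k]? = some true

lemma presG (graph : List (List Int)) (f : Nat) (hD : PresD graph f) :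
    ∀ vs leaf lm rm visited segments nseg leaf' lm' rm' v1 s1 n1,
      goA graph f vs leaf lm rm visited segments nseg = some (leaf', lm', rm', v1, s1, n1) →
      v1.length = visited.length ∧ s1.length = segments.length ∧
      v1.count false ≤ visited.count false ∧
      (∀ k : Nat, visited[k]? = some true → v1[k]? = some true) := by
  intro vs
  induction vs with
  | nil =>
    intro leaf lm rm visited segments nseg leaf' lm' rm' v1 s1 n1 h
    simp only [goA] at h
    obtain ⟨rfl, rfl, rfl, rfl, rfl, rfl⟩ :
        leaf = leaf' ∧ lm = lm' ∧ rm = rm' ∧ visited = v1 ∧ segments = s1 ∧ nseg = n1 := by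
      simpa using h
    exact ⟨rfl, rfl, le_refl _, fun k h => h⟩
  | cons v vs' ih =>
    intro leaf lm rm visited segments nseg leaf' lm' rm' v1 s1 n1 h
    rw [goA] at h
    cases hg : PySem.List.pyGet? visited v <;> rw [hg] at h
    · exact absurd h (by simp)
    case some b =>
      cases b
      · cases hs : PySem.List.pySet? visited v true <;> rw [hs] at h
        · exact absurd h (by simp)
        case some visited' =>
          dsimp only at h
          cases hA : dfsA graph f v visited' segments nseg <;> rw [hA] at h
          · exact absurd h (by simp)
          case some res =>
            obtain ⟨seg, v2, s2, n2⟩ := res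
            match seg, h with
            | [l, r], h =>
              obtain ⟨h1, h2, h3, h4⟩ := hD v visited' segments nseg [l, r] v2 s2 n2 hA
              obtain ⟨g1, g2, g3, g4⟩ :=
                ih false (min lm l) (max rm r) v2 s2 n2 leaf' lm' rm' v1 s1 n1 h
              obtain ⟨e1, e2⟩ := cf_set_false visited v visited' hg hs
              refine ⟨by omega, by omega, by omega, fun k hk => g4 k (h4 k ?_)⟩
              exact set_true_mono visited v visited' hs k hk
      · exact ih leaf lm rm visited segments nseg leaf' lm' rm' v1 s1 n1 h

lemma presD (graph : List (List Int)) : ∀ f, PresD graph f := by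
  intro f
  induction f with
  | zero => intro u visited segments nseg seg v1 s1 n1 h; exact absurd h (by simp [dfsA])
  | succ f ih =>
    intro u visited segments nseg seg v1 s1 n1 h
    rw [dfsA] at h
    cases hr : PySem.List.pyGet? graph u <;> rw [hr] at h
    · exact absurd h (by simp)
    case some row =>
      dsimp only at h
      cases hgo : goA graph f row true (nseg + 1) 0 visited segments nseg <;> rw [hgo] at h
      · exact absurd h (by simp)
      case some res =>
        obtain ⟨leaf, lm, rm, v1', s1', n1'⟩ := res
        obtain ⟨p1, p2, p3, p4⟩ := presG graph f ih row true (nseg + 1) 0 visited segments nseg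
          leaf lm rm v1' s1' n1' hgo
        cases leaf <;> simp only [Bool.false_eq_true, if_false, if_true] at h
        · cases hs : PySem.List.pySet? s1' u [lm, rm] <;> rw [hs] at h
          · exact absurd h (by simp)
          case some s2 =>
            obtain ⟨rfl, rfl, rfl, rfl⟩ :
                [lm, rm] = seg ∧ v1' = v1 ∧ s2 = s1 ∧ n1' = n1 := by simpa using h
            have := pySet?_length s1' u [lm, rm] s2 hs
            exact ⟨p1, by omega, p3, p4⟩
        · cases hs : PySem.List.pySet? s1' u [n1' + 1, n1' + 1] <;> rw [hs] at h
          · exact absurd h (by simp)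
          case some s2 =>
            obtain ⟨rfl, rfl, rfl, rfl⟩ :
                [n1' + 1, n1' + 1] = seg ∧ v1' = v1 ∧ s2 = s1 ∧ n1' + 1 = n1 := by simpa using h
            have := pySet?_length s1' u [n1' + 1, n1' + 1] s2 hs
            exact ⟨p1, by omega, p3, p4⟩

-- B's machine ignores a neighbour that is already visited, like A's loop
lemma dfsA_row (graph : List (List Int)) (f : Nat) (v : Int) (visited : List Bool)
    (segments : List (List Int)) (nseg : Int) (r : List Int × List Bool × List (List Int) × Int)
    (h : dfsA graph f v visited segments nseg = some r) :
    ∃ rowv, PySem.List.pyGet? graph v = some rowv := by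
  cases f with
  | zero => simp [dfsA] at h
  | succ f0 =>
    rw [dfsA] at h
    cases hr : PySem.List.pyGet? graph v <;> rw [hr] at h
    · simp at h
    · exact ⟨_, rfl⟩

lemma runB_skip (graph : List (List Int)) (F : Nat) (node v : Int) (vs : List Int)
    (lm rm : Int) (leaf : Bool) (S : List (Int × List Int × Int × Int × Bool))
    (visited : List Bool) (segments : List (List Int)) (nseg : Int)
    (h : PySem.List.pyGet? visited v = some true) :
    runB graph F ((node, v :: vs, lm, rm, leaf) :: S) visited segments nseg
      = runB graph F ((node, vs, lm, rm, leaf) :: S) visited segments nseg := by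
  cases F with
  | zero => rfl
  | succ F =>
    have : findChildB (v :: vs) visited = findChildB vs visited := by
      simp [findChildB, h]
    simp only [runB, this]

-- the simulation: running B's machine on a frame for u equals A's recursion on u, then
-- folding A's result into the parent frame (or stopping if the stack is empty)
def MainSim (graph : List (List Int)) (f : Nat) : Prop :=
  ∀ u row visited segments nseg l r v1 s1 n1,
    PySem.List.pyGet? graph u = some row →
    dfsA graph f u visited segments nseg = some ([l, r], v1, s1, n1) →
    ∀ (S : List (Int × List Int × Int × Int × Bool)) (g : Nat),
      runB graph (2 * (visited.count false - v1.count false) + 1 + g)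
          ((u, row, nseg + 1, 0, true) :: S) visited segments nseg
        = match S with
          | [] => some ([l, r], n1)
          | (pn, pr, plm, prm, pl) :: S' =>
            runB graph g ((pn, pr, min plm l, max prm r, pl) :: S') v1 s1 n1

lemma goSim (graph : List (List Int)) (f : Nat) (hM : MainSim graph f) (hD : PresD graph f) :
    ∀ vs leaf lm rm visited segments nseg leaf' lm' rm' v1 s1 n1,
      goA graph f vs leaf lm rm visited segments nseg = some (leaf', lm', rm', v1, s1, n1) →
      ∀ (node : Int) (S : List (Int × List Int × Int × Int × Bool)) (g : Nat),
        runB graph (2 * (visited.count false - v1.count false) + g)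
            ((node, vs, lm, rm, leaf) :: S) visited segments nseg
          = runB graph g ((node, [], lm', rm', leaf') :: S) v1 s1 n1 := by
  intro vs
  induction vs with
  | nil =>
    intro leaf lm rm visited segments nseg leaf' lm' rm' v1 s1 n1 h node S g
    obtain ⟨rfl, rfl, rfl, rfl, rfl, rfl⟩ :
        leaf = leaf' ∧ lm = lm' ∧ rm = rm' ∧ visited = v1 ∧ segments = s1 ∧ nseg = n1 := by
      simpa [goA] using h
    simp
  | cons v vs' ih =>
    intro leaf lm rm visited segments nseg leaf' lm' rm' v1 s1 n1 h node S g
    rw [goA] at h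
    cases hg : PySem.List.pyGet? visited v <;> rw [hg] at h
    · exact absurd h (by simp)
    case some b =>
      cases b
      · -- unvisited neighbour: descend
        dsimp only at h
        cases hs : PySem.List.pySet? visited v true <;> rw [hs] at h
        · exact absurd h (by simp)
        case some visited' =>
          dsimp only at h
          cases hA : dfsA graph f v visited' segments nseg <;> rw [hA] at h
          · exact absurd h (by simp)
          case some res =>
            obtain ⟨seg, v2, s2, n2⟩ := res
            match seg, h with
            | [l, r], h =>
              obtain ⟨e1, e2⟩ := cf_set_false visited v visited' hg hs
              obtain ⟨d1, d2, d3, d4⟩ := presD graph f v visited' segments nseg [l, r] v2 s2 n2 hA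
              obtain ⟨g1, g2, g3⟩ := presG graph f hD vs' false (min lm l) (max rm r) v2 s2 n2
                leaf' lm' rm' v1 s1 n1 h
              obtain ⟨rowv, hrow⟩ := dfsA_row graph f v visited' segments nseg _ hA
              have key := hM v rowv visited' segments nseg l r v2 s2 n2 hrow hA
                ((node, vs', lm, rm, false) :: S) (2 * (v2.count false - v1.count false) + g)
              have ihr := ih false (min lm l) (max rm r) v2 s2 n2 leaf' lm' rm' v1 s1 n1 h node S g
              have hfc : findChildB (v :: vs') visited = some (some v, vs') := by
                simp [findChildB, hg]
              have hfuel : 2 * (visited.count false - v1.count false) + g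
                  = (2 * (visited'.count false - v2.count false) + 1
                      + (2 * (v2.count false - v1.count false) + g)) + 1 := by omega
              rw [hfuel, runB, hfc]
              dsimp only
              rw [hs]
              dsimp only
              rw [hrow]
              dsimp only
              exact key.trans ihr
      · -- already-visited neighbour: both sides skip it
        rw [runB_skip graph _ node v vs' lm rm leaf S visited segments nseg hg]
        exact ih leaf lm rm visited segments nseg leaf' lm' rm' v1 s1 n1 h node S g

lemma mainSim (graph : List (List Int)) : ∀ f, MainSim graph f := by
  intro f
  induction f with
  | zero =>
    intro u row visited segments nseg l r v1 s1 n1 hrow hA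
    simp [dfsA] at hA
  | succ f ih =>
    intro u row visited segments nseg l r v1 s1 n1 hrow hA S g
    rw [dfsA, hrow] at hA
    dsimp only at hA
    cases hgo : goA graph f row true (nseg + 1) 0 visited segments nseg <;> rw [hgo] at hA
    · exact absurd hA (by simp)
    case some res =>
      obtain ⟨leaf, lm, rm, v1', s1', n1'⟩ := res
      have gs := goSim graph f ih (presD graph f) row true (nseg + 1) 0 visited segments nseg
        leaf lm rm v1' s1' n1' hgo u S (g + 1)
      cases leaf <;> simp only [Bool.false_eq_true, if_false, if_true] at hA
      · -- not a leaf
        cases hs : PySem.List.pySet? s1' u [lm, rm] <;> rw [hs] at hA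
        · exact absurd hA (by simp)
        case some s2 =>
          obtain ⟨⟨rfl, rfl⟩, rfl, rfl, rfl⟩ :
              (lm = l ∧ rm = r) ∧ v1' = v1 ∧ s2 = s1 ∧ n1' = n1 := by simpa using hA
          have hf : ∀ a : Nat, 2 * a + 1 + g = 2 * a + (g + 1) := fun a => by omega
          rw [hf, gs, runB]
          simp only [findChildB, Bool.false_eq_true, if_false]
          rw [hs]
      · -- leaf
        cases hs : PySem.List.pySet? s1' u [n1' + 1, n1' + 1] <;> rw [hs] at hA
        · exact absurd hA (by simp)
        case some s2 =>
          obtain ⟨⟨rfl, rfl⟩, rfl, rfl, rfl⟩ :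
              (n1' + 1 = l ∧ n1' + 1 = r) ∧ v1' = v1 ∧ s2 = s1 ∧ n1' + 1 = n1 := by simpa using hA
          have hf : ∀ a : Nat, 2 * a + 1 + g = 2 * a + (g + 1) := fun a => by omega
          rw [hf, gs, runB]
          simp only [findChildB, if_true]
          rw [hs]

-- sufficiency: if the dereference check succeeds, A's port returns (with the same final marks)
def ChkD (graph : List (List Int)) (ns : Nat) (f : Nat) : Prop :=
  ∀ u visited v1, chkD graph ns f u visited = some v1 →
    ∀ segments nseg, segments.length = ns →
      ∃ l r s1 n1, dfsA graph f u visited segments nseg = some ([l, r], v1, s1, n1) ∧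
        s1.length = ns

lemma chkSoundG (graph : List (List Int)) (ns : Nat) (f : Nat) (hD : ChkD graph ns f) :
    ∀ vs visited v1, chkG (chkD graph ns f) vs visited = some v1 →
      ∀ leaf lm rm segments nseg, segments.length = ns →
        ∃ leaf' lm' rm' s1 n1,
          goA graph f vs leaf lm rm visited segments nseg = some (leaf', lm', rm', v1, s1, n1) ∧
          s1.length = ns := by
  intro vs
  induction vs with
  | nil =>
    intro visited v1 h leaf lm rm segments nseg hns
    obtain rfl : visited = v1 := by simpa [chkG] using h
    exact ⟨leaf, lm, rm, segments, nseg, by rw [goA], hns⟩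
  | cons v vs' ih =>
    intro visited v1 h leaf lm rm segments nseg hns
    rw [chkG] at h
    cases hg : PySem.List.pyGet? visited v <;> rw [hg] at h
    · exact absurd h (by simp)
    case some b =>
      cases b
      · dsimp only at h
        cases hs : PySem.List.pySet? visited v true <;> rw [hs] at h
        · exact absurd h (by simp)
        case some visited' =>
          dsimp only at h
          cases hc : chkD graph ns f v visited' <;> rw [hc] at h
          · exact absurd h (by simp)
          case some v2 =>
            obtain ⟨l, r, s2, n2, hA, hlen2⟩ := hD v visited' v2 hc segments nseg hns
            obtain ⟨leaf', lm', rm', s1, n1, hgo, hlen1⟩ :=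
              ih v2 v1 h false (min lm l) (max rm r) s2 n2 hlen2
            refine ⟨leaf', lm', rm', s1, n1, ?_, hlen1⟩
            rw [goA, hg]
            dsimp only
            rw [hs]
            dsimp only
            rw [hA]
            exact hgo
      · obtain ⟨leaf', lm', rm', s1, n1, hgo, hlen1⟩ :=
          ih visited v1 h leaf lm rm segments nseg hns
        exact ⟨leaf', lm', rm', s1, n1, by rw [goA, hg]; exact hgo, hlen1⟩

lemma chkSoundD (graph : List (List Int)) (ns : Nat) : ∀ f, ChkD graph ns f := by
  intro f
  induction f with
  | zero => intro u visited v1 h; exact absurd h (by simp [chkD])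
  | succ f ih =>
    intro u visited v1 h segments nseg hns
    rw [chkD] at h
    cases hr : PySem.List.pyGet? graph u <;> rw [hr] at h
    · exact absurd h (by simp)
    case some row =>
      dsimp only at h
      cases hgc : chkG (chkD graph ns f) row visited <;> rw [hgc] at h
      · exact absurd h (by simp)
      case some v1' =>
        dsimp only at h
        cases hk : PySem.List.pyIdx? ns u <;> rw [hk] at h
        · exact absurd h (by simp)
        case some k =>
          obtain rfl : v1' = v1 := by simpa using h
          obtain ⟨leaf, lm, rm, s1, n1, hgo, hlen1⟩ :=
            chkSoundG graph ns f ih row visited v1' hgc true (nseg + 1) 0 segments nseg hns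
          have hk1 : PySem.List.pyIdx? s1.length u = some k := by rw [hlen1]; exact hk
          cases leaf
          · refine ⟨lm, rm, s1.set k [lm, rm], n1, ?_, by simp [hlen1]⟩
            rw [dfsA, hr]
            dsimp only
            rw [hgo]
            simp only [Bool.false_eq_true, if_false]
            rw [pySet?_some_of_pyIdx? s1 u [lm, rm] k hk1]
          · refine ⟨n1 + 1, n1 + 1, s1.set k [n1 + 1, n1 + 1], n1 + 1, ?_, by simp [hlen1]⟩
            rw [dfsA, hr]
            dsimp only
            rw [hgo]
            simp only [if_true]
            rw [pySet?_some_of_pyIdx? s1 u [n1 + 1, n1 + 1] k hk1]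

-- ===== VERDICT (by name: the statement is the Claim_ definition above) =====
theorem dfs_spec : Claim_equal_dfs := by
  unfold Claim_equal_dfs Spec_dfs
  intro u graph visited segments nseg _ hpre
  unfold Pre_dfs at hpre
  cases hchk : chkD graph segments.length (visited.length + 1) u visited with
  | none => rw [hchk] at hpre; simp at hpre
  | some v1 =>
    obtain ⟨l, r, s1, n1, hA, -⟩ :=
      chkSoundD graph segments.length (visited.length + 1) u visited v1 hchk segments nseg rfl
    obtain ⟨row, hrow⟩ := dfsA_row graph _ u visited segments nseg _ hA
    have hM := mainSim graph (visited.length + 1) u row visited segments nseg l r v1 s1 n1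
      hrow hA [] (2 * visited.length + 2 - (2 * (visited.count false - v1.count false) + 1))
    have hk : visited.count false ≤ visited.length := List.count_le_length
    have hfuel : 2 * (visited.count false - v1.count false) + 1
        + (2 * visited.length + 2 - (2 * (visited.count false - v1.count false) + 1))
        = 2 * visited.length + 2 := by omega
    rw [hfuel] at hM
    simp only [dfs, dfs_alt, hA, hrow, hM]
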